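-- pv_equiv track=rewrite | github.com/likepotatoman/AOC-2024 | Day 9/S2.py | stats_number
-- ===== SOURCE A (Python) =====
-- def stats_number(n,data):
--     lowest_index_number = 0
--     number_length = 0
--
--     lowest_found = False
--     for i in range(len(data)):
--         if lowest_found == False:
--             if data[i] == n:
--                 lowest_found = True
--                 lowest_index_number = i
--                 number_length += 1
--         else :
--             if data[i] == n:
--                 number_length += 1
--
--     return number_length, lowest_index_number
-- ===== SOURCE B (Python) =====
-- def stats_number(n, data):
--     # Single backward pass: scan from the end; a hit resets the distance
--     # counter, and once any hit exists each earlier non-hit increments it,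
--     # so the distance ends as the first index (0 and count 0 when absent).
--     count = 0
--     dist = 0
--     for x in reversed(data):
--         if x == n:
--             count += 1
--             dist = 0
--         elif count:
--             dist += 1
--     return count, dist
-- ===== Notes on version B (the rewrite author's own statement) =====
-- stated objective: alternative
-- what changed: Replaces A's forward scan with a found-flag and stored index by a backward scan that needs no flag: each hit resets a distance counter that earlier non-hits then increment, so the distance comes out as the first index.
import Mathlib
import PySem

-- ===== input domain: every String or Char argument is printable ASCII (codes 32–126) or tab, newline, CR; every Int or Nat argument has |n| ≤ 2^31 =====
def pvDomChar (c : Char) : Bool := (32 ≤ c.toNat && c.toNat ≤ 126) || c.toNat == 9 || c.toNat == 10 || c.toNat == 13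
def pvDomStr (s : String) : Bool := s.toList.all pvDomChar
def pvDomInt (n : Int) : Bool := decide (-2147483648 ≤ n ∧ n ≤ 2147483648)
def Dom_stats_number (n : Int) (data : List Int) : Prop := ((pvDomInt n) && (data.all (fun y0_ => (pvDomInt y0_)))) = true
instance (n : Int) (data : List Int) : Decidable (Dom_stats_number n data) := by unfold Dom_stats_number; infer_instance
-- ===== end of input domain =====

-- B replaces A's forward found-flag scan by a single backward pass whose distance counter ends as the first index; return values only, no mutation.


-- ===== PORT A =====
-- loop of A: state (lowest_found, lowest_index_number, number_length), index i
def statsLoopA (n : Int) : List Int → Int → (Bool × Int × Int) → Bool × Int × Int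
  | [], _, st => st
  | x :: xs, i, (found, idx, cnt) =>
    statsLoopA n xs (i + 1)
      (if found = false then
        (if x = n then (true, i, cnt + 1) else (found, idx, cnt))
      else
        (if x = n then (found, idx, cnt + 1) else (found, idx, cnt)))

def stats_number (n : Int) (data : List Int) : Int × Int :=
  let st := statsLoopA n data 0 (false, 0, 0)
  (st.2.2, st.2.1)

-- ===== PORT B =====
-- B's loop: state (count, dist), over the reversed list
def statsLoopB (n : Int) : List Int → (Int × Int) → Int × Int
  | [], st => st
  | x :: xs, (c, d) =>
    statsLoopB n xs (if x = n then (c + 1, 0) else if c ≠ 0 then (c, d + 1) else (c, d))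

def stats_number_alt (n : Int) (data : List Int) : Int × Int :=
  statsLoopB n data.reverse (0, 0)

-- ===== PRECONDITION & SPEC =====
def Spec_stats_number (n : Int) (data : List Int) (out : Int × Int) : Prop := out = stats_number_alt n data
instance (n : Int) (data : List Int) (out : Int × Int) : Decidable (Spec_stats_number n data out) := by unfold Spec_stats_number; infer_instance

-- ===== CLAIM =====
def Claim_equal_stats_number : Prop := ∀ (n : Int) (data : List Int), Dom_stats_number n data → Spec_stats_number n data (stats_number n data)

-- ===== LEMMAS AND PROOFS =====

lemma statsLoopA_found (n : Int) : ∀ (xs : List Int) (i idx cnt : Int),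
    statsLoopA n xs i (true, idx, cnt) = (true, idx, cnt + (xs.count n : Int)) := by
  intro xs
  induction xs with
  | nil => intro i idx cnt; simp [statsLoopA]
  | cons x xs ih =>
    intro i idx cnt
    by_cases h : x = n
    · simp [statsLoopA, h, ih]
      ring
    · simp [statsLoopA, h, ih]

lemma statsLoopA_notfound (n : Int) : ∀ (xs : List Int) (i cnt : Int),
    statsLoopA n xs i (false, 0, cnt) =
      match PySem.List.index? xs n with
      | none => (false, 0, cnt)
      | some j => (true, i + (j : Int), cnt + (xs.count n : Int)) := by
  intro xs
  induction xs with
  | nil => intro i cnt; rfl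
  | cons x xs ih =>
    intro i cnt
    by_cases h : x = n
    · subst h
      rw [PySem.List.index?_cons_self]
      simp [statsLoopA, statsLoopA_found]
      ring
    · rw [PySem.List.index?_cons_of_ne xs h]
      simp only [statsLoopA, if_neg h, ite_self]
      rw [ih]
      cases hix : PySem.List.index? xs n with
      | none => simp
      | some j =>
        simp [h]
        ring

lemma statsLoopB_append (n : Int) : ∀ (l l' : List Int) (st : Int × Int),
    statsLoopB n (l ++ l') st = statsLoopB n l' (statsLoopB n l st) := by
  intro l
  induction l with
  | nil => intro l' st; rfl
  | cons x xs ih => intro l' st; obtain ⟨c, d⟩ := st; simp [statsLoopB, ih]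

lemma statsLoopB_char (n : Int) : ∀ (data : List Int),
    statsLoopB n data.reverse (0, 0) =
      ((data.count n : Int),
        match PySem.List.index? data n with
        | none => 0
        | some j => (j : Int)) := by
  intro data
  induction data with
  | nil => rfl
  | cons x xs ih =>
    rw [List.reverse_cons, statsLoopB_append, ih]
    by_cases h : x = n
    · subst h
      rw [PySem.List.index?_cons_self]
      simp [statsLoopB]
    · rw [PySem.List.index?_cons_of_ne xs h]
      cases hix : PySem.List.index? xs n with
      | none =>
        have hnm : n ∉ xs := (PySem.List.index?_eq_none_iff xs n).mp hix
        simp [statsLoopB, h, List.count_eq_zero_of_not_mem hnm]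
      | some j =>
        have hmem : n ∈ xs := (PySem.List.index?_isSome_iff xs n).mp (by rw [hix]; rfl)
        have hc : xs.count n ≠ 0 := by
          have := List.count_pos_iff.mpr hmem; omega
        have hc' : (xs.count n : Int) ≠ 0 := by exact_mod_cast hc
        simp [statsLoopB, h]
        exact hc

-- ===== VERDICT =====
theorem stats_number_spec : Claim_equal_stats_number := by
  intro n data _
  unfold Spec_stats_number stats_number stats_number_alt
  rw [statsLoopA_notfound, statsLoopB_char]
  cases hix : PySem.List.index? data n with
  | none =>
    have hnm : n ∉ data := (PySem.List.index?_eq_none_iff data n).mp hix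
    simp [List.count_eq_zero_of_not_mem hnm]
  | some j => simp
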